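-- pv_equiv track=rewrite | github.com/BrentLagesse/CytoCV | cytocv/core/management/commands/rewrite_channel_naming_artifacts.py | _rewrite_plugin_id
-- ===== SOURCE A (Python) =====
-- from typing import Any
--
-- PLUGIN_RENAMES = {
--     "MCherryLine": "PunctaDistance",
--     "RedLineIntensity": "PunctaDistance",
--     "GFPDot": "CENDot",
--     "DAPI_NucleusIntensity": "BlueNucleusIntensity",
--     "NuclearCellularIntensity": "NuclearCellPairIntensity",
-- }
--
-- def _rewrite_plugin_id(value: Any) -> Any:
--     rewritten = value
--     while rewritten in PLUGIN_RENAMES: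
--         next_value = PLUGIN_RENAMES[rewritten]
--         if next_value == rewritten:
--             break
--         rewritten = next_value
--     return rewritten
-- ===== SOURCE B (Python) =====
-- from typing import Any
--
-- PLUGIN_RENAMES = {
--     "MCherryLine": "PunctaDistance",
--     "RedLineIntensity": "PunctaDistance",
--     "GFPDot": "CENDot",
--     "DAPI_NucleusIntensity": "BlueNucleusIntensity",
--     "NuclearCellularIntensity": "NuclearCellPairIntensity",
-- }
--
-- def _rewrite_plugin_id(value: Any) -> Any:
--     # Direct branch table: the rename map is a small fixed constant whose
--     # targets are never keys, so every chain is one hop and a conditional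
--     # chain gives the answer without any dict traversal or loop.
--     if value == "MCherryLine":
--         return "PunctaDistance"
--     if value == "RedLineIntensity":
--         return "PunctaDistance"
--     if value == "GFPDot":
--         return "CENDot"
--     if value == "DAPI_NucleusIntensity":
--         return "BlueNucleusIntensity"
--     if value == "NuclearCellularIntensity":
--         return "NuclearCellPairIntensity"
--     return value
-- ===== Notes on version B (the rewrite author's own statement) =====
-- stated objective: simpler
-- what changed: Replaces the while-loop that follows rename chains through the dict by a flat if/elif branch table with no dict and no loop, valid because no target value of the constant rename map is itself a key.
import Mathlib
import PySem

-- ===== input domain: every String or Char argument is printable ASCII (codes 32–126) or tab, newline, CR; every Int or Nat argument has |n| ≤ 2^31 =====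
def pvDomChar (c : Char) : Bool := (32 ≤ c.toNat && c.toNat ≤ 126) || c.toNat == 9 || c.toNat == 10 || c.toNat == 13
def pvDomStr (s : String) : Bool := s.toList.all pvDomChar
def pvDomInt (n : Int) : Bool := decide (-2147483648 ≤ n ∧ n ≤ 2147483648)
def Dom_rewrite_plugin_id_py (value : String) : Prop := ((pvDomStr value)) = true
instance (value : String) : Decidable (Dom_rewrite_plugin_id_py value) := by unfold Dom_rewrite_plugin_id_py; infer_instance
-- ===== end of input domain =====

-- B replaces A's dict-driven while-loop by a flat if/elif branch table (simpler; same result since no rename target is itself a key).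

-- ===== PORT A =====
-- PLUGIN_RENAMES, a module constant dict (insertion order).
def pluginRenames : PySem.Dict String String := PySem.Dict.ofList
  [("MCherryLine", "PunctaDistance"),
   ("RedLineIntensity", "PunctaDistance"),
   ("GFPDot", "CENDot"),
   ("DAPI_NucleusIntensity", "BlueNucleusIntensity"),
   ("NuclearCellularIntensity", "NuclearCellPairIntensity")]

-- A's while-loop, step for step; fuel bounds the iterations (the Python loop
-- terminates because the constant dict has no chains; fuel 6 > dict size suffices).
def rewriteLoop (rewritten : String) : Nat → String
  | 0 => rewritten
  | n + 1 =>
    match PySem.Dict.get? pluginRenames rewritten with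
    | none => rewritten
    | some next_value =>
      if next_value = rewritten then rewritten
      else rewriteLoop next_value n

def rewrite_plugin_id_py (value : String) : String :=
  rewriteLoop value 6

-- ===== PORT B =====
-- B's if/elif chain, branch for branch: no dict, no loop.
def rewrite_plugin_id_py_alt (value : String) : String :=
  if value = "MCherryLine" then "PunctaDistance"
  else if value = "RedLineIntensity" then "PunctaDistance"
  else if value = "GFPDot" then "CENDot"
  else if value = "DAPI_NucleusIntensity" then "BlueNucleusIntensity"
  else if value = "NuclearCellularIntensity" then "NuclearCellPairIntensity"
  else value

-- ===== PRECONDITION & SPEC =====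
def Spec_rewrite_plugin_id_py (value : String) (out : String) : Prop := out = rewrite_plugin_id_py_alt value
instance (value : String) (out : String) : Decidable (Spec_rewrite_plugin_id_py value out) := by unfold Spec_rewrite_plugin_id_py; infer_instance

-- ===== CLAIM =====
def Claim_equal_rewrite_plugin_id_py : Prop := ∀ (value : String), Dom_rewrite_plugin_id_py value → Spec_rewrite_plugin_id_py value (rewrite_plugin_id_py value)

-- ===== LEMMAS AND PROOFS =====

set_option maxRecDepth 4000 in
lemma get?_pluginRenames (v : String) :
    PySem.Dict.get? pluginRenames v =
      (if v = "MCherryLine" then some "PunctaDistance"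
       else if v = "RedLineIntensity" then some "PunctaDistance"
       else if v = "GFPDot" then some "CENDot"
       else if v = "DAPI_NucleusIntensity" then some "BlueNucleusIntensity"
       else if v = "NuclearCellularIntensity" then some "NuclearCellPairIntensity"
       else none) := by
  have hd : pluginRenames = PySem.Dict.mk
      [("MCherryLine", "PunctaDistance"),
       ("RedLineIntensity", "PunctaDistance"),
       ("GFPDot", "CENDot"),
       ("DAPI_NucleusIntensity", "BlueNucleusIntensity"),
       ("NuclearCellularIntensity", "NuclearCellPairIntensity")] := by decide
  rw [hd]
  simp only [PySem.Dict.get?_mk_cons, beq_iff_eq]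
  split_ifs <;> subst_vars <;> first
    | rfl
    | (exact absurd ‹_› (by decide))
    | (exact absurd ‹_›.symm (by decide))
    | (exact absurd rfl ‹_›)

-- No value of the constant dict is one of its keys.
lemma pluginRenames_flat (v w : String)
    (h : PySem.Dict.get? pluginRenames v = some w) :
    PySem.Dict.get? pluginRenames w = none := by
  rw [get?_pluginRenames] at h
  split_ifs at h <;> (simp at h; subst h; decide)

-- ===== VERDICT =====
theorem rewrite_plugin_id_py_spec : Claim_equal_rewrite_plugin_id_py := by
  intro value _
  unfold Spec_rewrite_plugin_id_py rewrite_plugin_id_py rewrite_plugin_id_py_alt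
  cases h : PySem.Dict.get? pluginRenames value with
  | none =>
    simp [rewriteLoop, h]
    rw [get?_pluginRenames] at h
    split_ifs at h <;> simp_all
  | some w =>
    have hw := pluginRenames_flat value w h
    have hv : w ≠ value := by
      intro e; subst e; simp [h] at hw
    simp [rewriteLoop, h, hv, hw]
    rw [get?_pluginRenames] at h
    split_ifs at h <;> simp_all
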